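-- pv_equiv track=rewrite | github.com/mikhailmartin/AdventOfCode2024 | Day8_Resonant_Collinearity.py | foo
-- ===== SOURCE A (Python) =====
-- def foo(antenna1, antenna2, max_rows, max_cols):
--
--     antinodes = {antenna1, antenna2}
--
--     # в одну сторону
--     dx = antenna2[0] - antenna1[0]
--     dy = antenna2[1] - antenna1[1]
--     antinode = antenna2
--     while is_inside_map(antinode, max_rows, max_cols):
--         antinodes.add(antinode)
--         antinode = antinode[0] + dx, antinode[1] + dy
--
--     # в другую сторону
--     dx = antenna1[0] - antenna2[0]
--     dy = antenna1[1] - antenna2[1]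
--     antinode = antenna1
--     while is_inside_map(antinode, max_rows, max_cols):
--         antinodes.add(antinode)
--         antinode = antinode[0] + dx, antinode[1] + dy
--
--     return antinodes
--
-- def is_inside_map(point: tuple[int, int], max_rows: int, max_cols: int) -> bool:
--     return (0 <= point[0] < max_rows) and (0 <= point[1] < max_cols)
-- ===== SOURCE B (Python) =====
-- def foo(antenna1, antenna2, max_rows, max_cols):
--     antinodes = {antenna1, antenna2}
--     for start, (dx, dy) in (
--         (antenna2, (antenna2[0] - antenna1[0], antenna2[1] - antenna1[1])),
--         (antenna1, (antenna1[0] - antenna2[0], antenna1[1] - antenna2[1])),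
--     ):
--         x0, y0 = start
--         if 0 <= x0 < max_rows and 0 <= y0 < max_cols:
--             bounds = []
--             if dx > 0:
--                 bounds.append((max_rows - 1 - x0) // dx)
--             elif dx < 0:
--                 bounds.append(x0 // (-dx))
--             if dy > 0:
--                 bounds.append((max_cols - 1 - y0) // dy)
--             elif dy < 0:
--                 bounds.append(y0 // (-dy))
--             k_max = min(bounds)  # nonempty: the antennas are distinct
--             for k in range(k_max + 1):
--                 antinodes.add((x0 + k * dx, y0 + k * dy))
--     return antinodes
-- ===== Notes on version B (the rewrite author's own statement) =====
-- stated objective: alternative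
-- what changed: B replaces A's step-and-test while loops by computing, per direction, the maximal in-grid step count k_max in closed form via one floor division per axis, then enumerating range(k_max+1) directly.
import Mathlib
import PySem

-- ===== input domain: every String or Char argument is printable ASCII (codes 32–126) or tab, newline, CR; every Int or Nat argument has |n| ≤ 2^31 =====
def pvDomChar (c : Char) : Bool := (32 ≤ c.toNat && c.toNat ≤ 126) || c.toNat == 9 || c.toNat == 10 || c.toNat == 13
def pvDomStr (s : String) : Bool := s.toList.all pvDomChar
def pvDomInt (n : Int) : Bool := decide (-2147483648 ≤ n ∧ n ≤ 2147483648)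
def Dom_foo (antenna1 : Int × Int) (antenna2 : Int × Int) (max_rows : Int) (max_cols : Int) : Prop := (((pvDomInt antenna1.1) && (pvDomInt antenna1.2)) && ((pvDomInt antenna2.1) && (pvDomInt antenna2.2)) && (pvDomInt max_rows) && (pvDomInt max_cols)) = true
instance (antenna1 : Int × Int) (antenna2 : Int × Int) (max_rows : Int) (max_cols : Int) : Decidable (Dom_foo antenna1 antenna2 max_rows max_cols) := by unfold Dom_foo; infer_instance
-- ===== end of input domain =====

-- B computes each direction's maximal in-grid step count by one floor division per axis and
-- enumerates range(k_max+1), instead of A's step-and-test while loop (objective: alternative).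

-- ===== PORT A =====
-- is_inside_map
def isInsideMap (point : Int × Int) (max_rows : Int) (max_cols : Int) : Bool :=
  decide (0 ≤ point.1 ∧ point.1 < max_rows) && decide (0 ≤ point.2 ∧ point.2 < max_cols)

-- A's 'while is_inside_map: add; step' loop; the fuel merely bounds the iteration count (on
-- Pre_foo inputs the loop runs at most max_rows+max_cols+1 times, so the fuel is never the
-- reason the loop stops there).
def fooLoop (max_rows max_cols dx dy : Int) : Nat → Int × Int → PySem.Set (Int × Int) → PySem.Set (Int × Int)
  | 0, _, acc => acc
  | Nat.succ f, antinode, acc =>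
    if isInsideMap antinode max_rows max_cols then
      fooLoop max_rows max_cols dx dy f (antinode.1 + dx, antinode.2 + dy) (PySem.Set.add acc antinode)
    else acc

def foo (antenna1 : Int × Int) (antenna2 : Int × Int) (max_rows : Int) (max_cols : Int) : List (Int × Int) :=
  let antinodes : PySem.Set (Int × Int) := PySem.Set.ofList [antenna1, antenna2]
  let fuel : Nat := max_rows.toNat + max_cols.toNat + 2
  let antinodes :=
    fooLoop max_rows max_cols (antenna2.1 - antenna1.1) (antenna2.2 - antenna1.2) fuel antenna2 antinodes
  let antinodes :=
    fooLoop max_rows max_cols (antenna1.1 - antenna2.1) (antenna1.2 - antenna2.2) fuel antenna1 antinodes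
  antinodes

-- ===== PORT B =====
-- per-axis step bound: a list with zero or one element, as in Source B
def axisBounds (x0 dx lim : Int) : List Int :=
  if dx > 0 then [PySem.Int.floordiv (lim - 1 - x0) dx]
  else if dx < 0 then [PySem.Int.floordiv x0 (-dx)]
  else []

-- one iteration of Source B's for-loop over the two (start, direction) pairs
def addLine (max_rows max_cols : Int) (start d : Int × Int) (acc : PySem.Set (Int × Int)) : PySem.Set (Int × Int) :=
  if (0 ≤ start.1 ∧ start.1 < max_rows) ∧ (0 ≤ start.2 ∧ start.2 < max_cols) then
    match PySem.List.min? (axisBounds start.1 d.1 max_rows ++ axisBounds start.2 d.2 max_cols) (fun x => x) with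
    | none => acc  -- Python's min([]) raises ValueError here; unreachable under Pre_foo
    | some kmax =>
      (PySem.List.pyRange 0 (kmax + 1) 1).foldl
        (fun a k => PySem.Set.add a (start.1 + k * d.1, start.2 + k * d.2)) acc
  else acc

def foo_alt (antenna1 : Int × Int) (antenna2 : Int × Int) (max_rows : Int) (max_cols : Int) : List (Int × Int) :=
  addLine max_rows max_cols antenna1 (antenna1.1 - antenna2.1, antenna1.2 - antenna2.2)
    (addLine max_rows max_cols antenna2 (antenna2.1 - antenna1.1, antenna2.2 - antenna1.2)
      (PySem.Set.ofList [antenna1, antenna2]))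

-- ===== PRECONDITION & SPEC =====
-- Pre_ excludes exactly the inputs on which A never returns: equal antennas lying inside the
-- grid make both of A's while loops step by (0,0) forever (B's min([]) raises there too).
def Pre_foo (antenna1 : Int × Int) (antenna2 : Int × Int) (max_rows : Int) (max_cols : Int) : Prop :=
  antenna1 ≠ antenna2 ∨ isInsideMap antenna1 max_rows max_cols = false
instance (antenna1 : Int × Int) (antenna2 : Int × Int) (max_rows : Int) (max_cols : Int) : Decidable (Pre_foo antenna1 antenna2 max_rows max_cols) := by unfold Pre_foo; infer_instance

def pvWitness_foo : (Int × Int) × (Int × Int) × Int × Int := ((0, 0), (1, 1), 3, 3)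

def Spec_foo (antenna1 : Int × Int) (antenna2 : Int × Int) (max_rows : Int) (max_cols : Int) (out : List (Int × Int)) : Prop := out = foo_alt antenna1 antenna2 max_rows max_cols
instance (antenna1 : Int × Int) (antenna2 : Int × Int) (max_rows : Int) (max_cols : Int) (out : List (Int × Int)) : Decidable (Spec_foo antenna1 antenna2 max_rows max_cols out) := by unfold Spec_foo; infer_instance

-- ===== CLAIM (what is proved, stated in full; the proofs are below) =====
def Claim_equal_foo : Prop := ∀ (antenna1 : Int × Int) (antenna2 : Int × Int) (max_rows : Int) (max_cols : Int), Dom_foo antenna1 antenna2 max_rows max_cols → Pre_foo antenna1 antenna2 max_rows max_cols → Spec_foo antenna1 antenna2 max_rows max_cols (foo antenna1 antenna2 max_rows max_cols)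

-- ===== LEMMAS AND PROOFS =====

-- foldl respects pointwise equality of the folded function
theorem foldl_fun_congr {α β : Type} (l : List β) (f g : α → β → α) (init : α)
    (h : ∀ a b, b ∈ l → f a b = g a b) : l.foldl f init = l.foldl g init := by
  induction l generalizing init with
  | nil => rfl
  | cons x t ih =>
      simp only [List.foldl_cons]
      rw [h init x (List.mem_cons_self ..)]
      exact ih _ (fun a b hb => h a b (List.mem_cons_of_mem _ hb))

-- A's loop, run with enough fuel, folds Set.add over the first n+1 points of the line.
theorem fooLoop_eq_range (mr mc dx dy : Int) :
    ∀ (n : Nat) (p : Int × Int) (acc : PySem.Set (Int × Int)) (fuel : Nat), n + 2 ≤ fuel →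
    (∀ k : Nat, k ≤ n → isInsideMap (p.1 + (k : Int) * dx, p.2 + (k : Int) * dy) mr mc = true) →
    isInsideMap (p.1 + ((n : Int) + 1) * dx, p.2 + ((n : Int) + 1) * dy) mr mc = false →
    fooLoop mr mc dx dy fuel p acc =
      (List.range (n + 1)).foldl
        (fun (a : PySem.Set (Int × Int)) (k : Nat) => PySem.Set.add a (p.1 + (k : Int) * dx, p.2 + (k : Int) * dy)) acc := by
  intro n
  induction n with
  | zero =>
      intro p acc fuel hfuel hin hout
      match fuel, hfuel with
      | (f + 2), _ =>
        have h0 : isInsideMap (p.1 + ((0 : Nat) : Int) * dx, p.2 + ((0 : Nat) : Int) * dy) mr mc = true := hin 0 (le_refl _)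
        have h0' : isInsideMap p mr mc = true := by simpa using h0
        simp only [fooLoop, h0', if_true]
        have h1 : isInsideMap (p.1 + dx, p.2 + dy) mr mc = false := by simpa using hout
        simp [h1, List.range_succ]
  | succ n ih =>
      intro p acc fuel hfuel hin hout
      match fuel, hfuel with
      | (f + 1), hfuel =>
        have h0 : isInsideMap p mr mc = true := by
          have := hin 0 (Nat.zero_le _); simpa using this
        simp only [fooLoop, h0, if_true]
        have hstep := ih (p.1 + dx, p.2 + dy) (PySem.Set.add acc p) f (by omega)
          (by
            intro k hk
            have := hin (k + 1) (by omega)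
            have e1 : p.1 + ((k : Int) + 1) * dx = p.1 + dx + (k : Int) * dx := by ring
            have e2 : p.2 + ((k : Int) + 1) * dy = p.2 + dy + (k : Int) * dy := by ring
            simpa [e1, e2] using this)
          (by
            have e1 : p.1 + dx + ((n : Int) + 1) * dx = p.1 + (((n : Nat) + 1 : Nat) : Int) * dx + dx := by push_cast; ring
            have e2 : p.2 + dy + ((n : Int) + 1) * dy = p.2 + (((n : Nat) + 1 : Nat) : Int) * dy + dy := by push_cast; ring
            simp only [e1, e2]
            have e3 : p.1 + (((n : Nat) + 1 : Nat) : Int) * dx + dx = p.1 + ((((n : Nat) + 1 : Nat) : Int) + 1) * dx := by ring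
            have e4 : p.2 + (((n : Nat) + 1 : Nat) : Int) * dy + dy = p.2 + ((((n : Nat) + 1 : Nat) : Int) + 1) * dy := by ring
            rw [e3, e4]; exact hout)
        rw [hstep]
        conv_rhs => rw [List.range_succ_eq_map]
        simp only [List.foldl_cons, List.foldl_map, Nat.cast_zero, zero_mul, add_zero]
        apply foldl_fun_congr
        intro a k _
        have e1 : p.1 + dx + (k : Int) * dx = p.1 + ((Nat.succ k : Nat) : Int) * dx := by push_cast; ring
        have e2 : p.2 + dy + (k : Int) * dy = p.2 + ((Nat.succ k : Nat) : Int) * dy := by push_cast; ring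
        rw [e1, e2]

-- per-axis characterisation of "after k steps the coordinate is still within [0, lim)"
theorem axis_char (x0 dx lim k : Int) (hx : 0 ≤ x0 ∧ x0 < lim) (hk : 0 ≤ k) :
    ((0 ≤ x0 + k * dx ∧ x0 + k * dx < lim) ↔ ∀ b ∈ axisBounds x0 dx lim, k ≤ b) := by
  unfold axisBounds
  rcases lt_trichotomy dx 0 with hneg | hz | hpos
  · rw [if_neg (by omega), if_pos hneg]
    simp only [List.mem_singleton, forall_eq]
    rw [PySem.Int.le_floordiv_iff_mul_le (by omega : (0:Int) < -dx)]
    constructor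
    · intro h; nlinarith [h.1]
    · intro h
      refine ⟨by nlinarith, by nlinarith [mul_nonneg hk (by omega : (0:Int) ≤ -dx)]⟩
  · subst hz; simp [hx.1, hx.2]
  · rw [if_pos hpos]
    simp only [List.mem_singleton, forall_eq]
    rw [PySem.Int.le_floordiv_iff_mul_le hpos]
    constructor
    · intro h; nlinarith [h.2]
    · intro h
      refine ⟨by nlinarith [mul_nonneg hk (le_of_lt hpos)], by nlinarith⟩

-- A's loop with the standard fuel equals one iteration of B's for-loop body.
theorem loop_eq_addLine (mr mc : Int) (start d : Int × Int)
    (hd : d ≠ (0, 0) ∨ isInsideMap start mr mc = false) (acc : PySem.Set (Int × Int)) :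
    fooLoop mr mc d.1 d.2 (mr.toNat + mc.toNat + 2) start acc = addLine mr mc start d acc := by
  by_cases hin : isInsideMap start mr mc = true
  · have hd' : d ≠ (0, 0) := by
      rcases hd with h | h
      · exact h
      · rw [hin] at h; cases h
    have hxy : (0 ≤ start.1 ∧ start.1 < mr) ∧ (0 ≤ start.2 ∧ start.2 < mc) := by
      unfold isInsideMap at hin; simpa using hin
    obtain ⟨hx, hy⟩ := hxy
    have hdd : d.1 ≠ 0 ∨ d.2 ≠ 0 := by
      by_contra hc
      push Not at hc
      exact hd' (Prod.ext hc.1 hc.2)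
    set bnds := axisBounds start.1 d.1 mr ++ axisBounds start.2 d.2 mc with hbnds
    have hne : bnds ≠ [] := by
      rcases hdd with h | h
      · have hone : axisBounds start.1 d.1 mr ≠ [] := by
          unfold axisBounds
          rcases lt_trichotomy d.1 0 with h1 | h1 | h1
          · rw [if_neg (by omega), if_pos h1]; simp
          · exact absurd h1 h
          · rw [if_pos h1]; simp
        simp [hbnds, hone]
      · have hone : axisBounds start.2 d.2 mc ≠ [] := by
          unfold axisBounds
          rcases lt_trichotomy d.2 0 with h1 | h1 | h1
          · rw [if_neg (by omega), if_pos h1]; simp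
          · exact absurd h1 h
          · rw [if_pos h1]; simp
        simp [hbnds, hone]
    obtain ⟨kmax, hkm⟩ : ∃ m, PySem.List.min? bnds (fun x => x) = some m := by
      cases hmin : PySem.List.min? bnds (fun x => x) with
      | none => exact absurd ((PySem.List.min?_eq_none_iff bnds _).mp hmin) hne
      | some m => exact ⟨m, rfl⟩
    have hmem : kmax ∈ bnds := PySem.List.min?_mem hkm
    have hisMin : ∀ b ∈ bnds, kmax ≤ b := PySem.List.min?_isMin hkm
    -- the inside predicate along the line is exactly k ≤ kmax
    have hchar : ∀ k : Int, 0 ≤ k →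
        (((0 ≤ start.1 + k * d.1 ∧ start.1 + k * d.1 < mr) ∧
          (0 ≤ start.2 + k * d.2 ∧ start.2 + k * d.2 < mc)) ↔ k ≤ kmax) := by
      intro k hk
      rw [axis_char start.1 d.1 mr k hx hk, axis_char start.2 d.2 mc k hy hk]
      constructor
      · intro ⟨h1, h2⟩
        refine le_trans (le_refl k) ?_
        rcases List.mem_append.mp hmem with hm | hm
        · exact h1 kmax hm
        · exact h2 kmax hm
      · intro hkk
        exact ⟨fun b hb => le_trans hkk (hisMin b (List.mem_append.mpr (Or.inl hb))),
               fun b hb => le_trans hkk (hisMin b (List.mem_append.mpr (Or.inr hb)))⟩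
    have h0k : 0 ≤ kmax := by
      have := (hchar 0 (le_refl _)).mp (by simpa using ⟨hx, hy⟩)
      exact this
    -- bound kmax by the grid size, to justify the fuel
    have hbound : kmax ≤ mr - 1 ∨ kmax ≤ mc - 1 := by
      have hins := (hchar kmax h0k).mpr (le_refl _)
      rcases hdd with h | h
      · left
        rcases lt_trichotomy d.1 0 with h1 | h1 | h1
        · have : kmax * (-d.1) ≤ start.1 := by nlinarith [hins.1.1]
          nlinarith [le_mul_of_one_le_right h0k (by omega : (1:Int) ≤ -d.1)]
        · exact absurd h1 h
        · have : kmax * d.1 ≤ mr - 1 - start.1 := by nlinarith [hins.1.2]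
          nlinarith [le_mul_of_one_le_right h0k (by omega : (1:Int) ≤ d.1)]
      · right
        rcases lt_trichotomy d.2 0 with h1 | h1 | h1
        · have : kmax * (-d.2) ≤ start.2 := by nlinarith [hins.2.1]
          nlinarith [le_mul_of_one_le_right h0k (by omega : (1:Int) ≤ -d.2)]
        · exact absurd h1 h
        · have : kmax * d.2 ≤ mc - 1 - start.2 := by nlinarith [hins.2.2]
          nlinarith [le_mul_of_one_le_right h0k (by omega : (1:Int) ≤ d.2)]
    have hkn : ((kmax.toNat : Int)) = kmax := Int.toNat_of_nonneg h0k
    have hA := fooLoop_eq_range mr mc d.1 d.2 kmax.toNat start acc (mr.toNat + mc.toNat + 2)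
      (by
        rcases hbound with h | h
        · have h1 : 0 < mr := by omega
          omega
        · have h1 : 0 < mc := by omega
          omega)
      (by
        intro k hk
        have hki : (0 : Int) ≤ (k : Int) := by positivity
        have hle : (k : Int) ≤ kmax := by omega
        have := (hchar (k : Int) hki).mpr hle
        unfold isInsideMap
        simpa using this)
      (by
        rw [hkn]
        have hni := (hchar (kmax + 1) (by omega)).not.mpr (by omega)
        unfold isInsideMap
        rw [Bool.and_eq_false_iff]
        simp only [decide_eq_false_iff_not]
        tauto)
    rw [hA]
    unfold addLine
    rw [if_pos ⟨hx, hy⟩, ← hbnds, hkm]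
    simp only
    rw [PySem.List.pyRange_one 0 (kmax + 1)]
    have hlen : (kmax + 1 - 0).toNat = kmax.toNat + 1 := by omega
    rw [hlen, List.foldl_map]
    apply foldl_fun_congr
    intro a k _
    simp
  · have hin' : isInsideMap start mr mc = false := by
      cases h : isInsideMap start mr mc
      · rfl
      · exact absurd h hin
    have hin2 : ¬ ((0 ≤ start.1 ∧ start.1 < mr) ∧ (0 ≤ start.2 ∧ start.2 < mc)) := by
      unfold isInsideMap at hin'
      simpa using hin'
    simp [fooLoop, hin', addLine, hin2]

-- ===== VERDICT (by name: the statement is the Claim_ definition above) =====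
theorem foo_spec : Claim_equal_foo := by
  intro a1 a2 mr mc _ hpre
  unfold Spec_foo foo foo_alt
  simp only
  by_cases heq : a1 = a2
  · subst heq
    have hout : isInsideMap a1 mr mc = false := by
      rcases hpre with h | h
      · exact absurd rfl h
      · exact h
    rw [loop_eq_addLine mr mc a1 (a1.1 - a1.1, a1.2 - a1.2) (Or.inr hout),
        loop_eq_addLine mr mc a1 (a1.1 - a1.1, a1.2 - a1.2) (Or.inr hout)]
  · have hd1 : ((a2.1 - a1.1, a2.2 - a1.2) : Int × Int) ≠ (0, 0) := by
      intro hc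
      have h1 : a2.1 - a1.1 = 0 := congrArg Prod.fst hc
      have h2 : a2.2 - a1.2 = 0 := congrArg Prod.snd hc
      exact heq (Prod.ext (by omega) (by omega)).symm
    have hd2 : ((a1.1 - a2.1, a1.2 - a2.2) : Int × Int) ≠ (0, 0) := by
      intro hc
      have h1 : a1.1 - a2.1 = 0 := congrArg Prod.fst hc
      have h2 : a1.2 - a2.2 = 0 := congrArg Prod.snd hc
      exact heq (Prod.ext (by omega) (by omega))
    rw [loop_eq_addLine mr mc a2 _ (Or.inl hd1), loop_eq_addLine mr mc a1 _ (Or.inl hd2)]
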